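-- pv_equiv track=rewrite | github.com/nityanantan23/Code-Files | backend.py | fonts_similar
-- ===== SOURCE A (Python) =====
-- def fonts_similar(font1, font2):
--     """Check if two fonts are similar enough"""
--     font1 = font1.lower()
--     font2 = font2.lower()
--
--     similar_groups = [
--         {"times new roman", "times", "timesroman"},
--         {"arial", "helvetica"},
--         {"calibri", "cambria"},
--     ]
--
--     for group in similar_groups:
--         if font1 in group and font2 in group:
--             return True
--
--     return font1 == font2
-- ===== SOURCE B (Python) =====
-- # Flatten the similar groups once into an explicit symmetric pair relation;
-- # per call: one equality test plus one pair-membership test, no loop over groups.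
-- _GROUPS = [
--     ["times new roman", "times", "timesroman"],
--     ["arial", "helvetica"],
--     ["calibri", "cambria"],
-- ]
-- _SIMILAR = {(a, b) for g in _GROUPS for a in g for b in g}
--
--
-- def fonts_similar(font1, font2):
--     """Check if two fonts are similar enough"""
--     f1 = font1.lower()
--     f2 = font2.lower()
--     return f1 == f2 or (f1, f2) in _SIMILAR
-- ===== Notes on version B (the rewrite author's own statement) =====
-- stated objective: alternative
-- what changed: Replaces the per-call loop over groups (two membership tests per group) by a precomputed flat symmetric relation of similar pairs; the answer is literal equality or one membership test of the ordered pair.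
import Mathlib
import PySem

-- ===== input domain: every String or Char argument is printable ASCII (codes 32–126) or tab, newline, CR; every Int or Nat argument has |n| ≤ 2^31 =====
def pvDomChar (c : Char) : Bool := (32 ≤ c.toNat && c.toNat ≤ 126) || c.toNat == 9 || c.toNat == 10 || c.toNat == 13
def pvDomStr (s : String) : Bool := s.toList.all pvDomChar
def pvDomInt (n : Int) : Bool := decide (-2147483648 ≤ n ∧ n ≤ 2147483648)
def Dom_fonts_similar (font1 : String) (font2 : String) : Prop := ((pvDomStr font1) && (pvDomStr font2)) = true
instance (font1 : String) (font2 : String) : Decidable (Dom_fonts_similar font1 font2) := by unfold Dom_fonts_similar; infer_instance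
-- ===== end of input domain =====

-- B flattens the groups once into an explicit symmetric pair relation and answers with
-- literal equality or one membership test of the ordered pair; same results, no speed claim.

-- ===== PORT A =====
def pvGroups : List (PySem.Set String) :=
  [PySem.Set.ofList ["times new roman", "times", "timesroman"],
   PySem.Set.ofList ["arial", "helvetica"],
   PySem.Set.ofList ["calibri", "cambria"]]

def pvLoopA (f1 f2 : String) : List (PySem.Set String) → Bool
  | [] => f1 == f2
  | g :: rest =>
      if PySem.Set.contains g f1 && PySem.Set.contains g f2 then true
      else pvLoopA f1 f2 rest

def fonts_similar (font1 : String) (font2 : String) : Bool :=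
  pvLoopA (PySem.Str.lower font1) (PySem.Str.lower font2) pvGroups

-- ===== PORT B =====
def pvGroupsB : List (List String) :=
  [["times new roman", "times", "timesroman"],
   ["arial", "helvetica"],
   ["calibri", "cambria"]]

-- {(a, b) for g in _GROUPS for a in g for b in g}
def pvSimilarPairs : PySem.Set (String × String) :=
  PySem.Set.ofList (pvGroupsB.flatMap fun g => g.flatMap fun a => g.map fun b => (a, b))

def fonts_similar_alt (font1 : String) (font2 : String) : Bool :=
  let f1 := PySem.Str.lower font1
  let f2 := PySem.Str.lower font2
  (f1 == f2) || PySem.Set.contains pvSimilarPairs (f1, f2)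

-- ===== PRECONDITION & SPEC =====
def Spec_fonts_similar (font1 : String) (font2 : String) (out : Bool) : Prop := out = fonts_similar_alt font1 font2
instance (font1 : String) (font2 : String) (out : Bool) : Decidable (Spec_fonts_similar font1 font2 out) := by unfold Spec_fonts_similar; infer_instance

-- ===== CLAIM =====
def Claim_equal_fonts_similar : Prop := ∀ (font1 : String) (font2 : String), Dom_fonts_similar font1 font2 → Spec_fonts_similar font1 font2 (fonts_similar font1 font2)

-- ===== LEMMAS AND PROOFS =====
def pvCls (x : String) : Option Int :=
  if x = "times new roman" ∨ x = "times" ∨ x = "timesroman" then some 0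
  else if x = "arial" ∨ x = "helvetica" then some 1
  else if x = "calibri" ∨ x = "cambria" then some 2
  else none

lemma loop_cls (a b : String) :
    pvLoopA a b pvGroups =
      (if pvCls a = none ∧ pvCls b = none then a == b else pvCls a == pvCls b) := by
  unfold pvCls
  split_ifs <;>
    simp_all [pvLoopA, pvGroups, PySem.Set.contains, PySem.Set.ofList, PySem.Set.add] <;>
    aesop

lemma contains_pairs (a b : String) :
    PySem.Set.contains pvSimilarPairs (a, b) =
      (!(pvCls a == none) && (pvCls a == pvCls b)) := by
  unfold pvCls
  split_ifs <;>
    simp_all [pvSimilarPairs, pvGroupsB, PySem.Set.contains, PySem.Set.ofList,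
      PySem.Set.add, List.flatMap, Prod.ext_iff] <;>
    aesop

theorem fonts_similar_spec : Claim_equal_fonts_similar := by
  intro f1 f2 _
  unfold Spec_fonts_similar
  simp only [fonts_similar, fonts_similar_alt, loop_cls, contains_pairs]
  generalize PySem.Str.lower f1 = a
  generalize PySem.Str.lower f2 = b
  by_cases hab : a = b
  · rw [hab]; cases pvCls b <;> simp
  · rcases h1 : pvCls a with _ | c1 <;> rcases h2 : pvCls b with _ | c2 <;>
      simp [hab]
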